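-- pv_equiv track=rewrite | github.com/mattjoyce/ductile-plugins | health_weekly_report/run.py | markdown_to_plaintext
-- ===== SOURCE A (Python) =====
-- from typing import Any, Dict, Iterable, List, Optional, Tuple
--
-- def markdown_to_plaintext(md: str) -> str:
--     """Best-effort plain-text fallback. Preserves narratives, drops tables, strips heading hashes."""
--     out: List[str] = []
--     in_table = False
--     for line in md.splitlines():
--         stripped = line.strip()
--         if stripped.startswith("|") and stripped.endswith("|"):
--             in_table = True
--             continue
--         if in_table and not stripped:
--             in_table = False
--             continue
--         if stripped.startswith("|---"):
--             continue
--         text = stripped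
--         while text.startswith("#"):
--             text = text[1:].lstrip()
--         text = text.replace("**", "").replace("`", "")
--         out.append(text)
--     # collapse triple-blank
--     flat: List[str] = []
--     blanks = 0
--     for ln in out:
--         if not ln:
--             blanks += 1
--             if blanks <= 1:
--                 flat.append(ln)
--         else:
--             blanks = 0
--             flat.append(ln)
--     return "\n".join(flat).strip() + "\n"
-- ===== SOURCE B (Python) =====
-- # Single streaming pass: each line is cleaned and blank-collapsed immediately; no intermediate list.
-- from typing import List, Optional, Tuple
--
-- def _clean_line(in_table: bool, line: str) -> Tuple[bool, Optional[str]]: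
--     s = line.strip()
--     if s.startswith("|") and s.endswith("|"):
--         return True, None
--     if in_table and not s:
--         return False, None
--     if s.startswith("|---"):
--         return in_table, None
--     t = s.lstrip("# \t")
--     return in_table, t.replace("**", "").replace("`", "")
--
-- def markdown_to_plaintext(md: str) -> str:
--     result: List[str] = []
--     in_table = False
--     blanks = 0
--     for line in md.splitlines():
--         in_table, t = _clean_line(in_table, line)
--         if t is None:
--             continue
--         if not t:
--             blanks += 1
--             if blanks <= 1:
--                 result.append(t)
--         else:
--             blanks = 0
--             result.append(t)
--     return "\n".join(result).strip() + "\n"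
-- ===== Notes on version B (the rewrite author's own statement) =====
-- stated objective: alternative
-- what changed: A's two sequential passes (clean every line into an intermediate list, then collapse blank runs over that list) are fused into one streaming loop that keeps the table flag and the blank counter simultaneously and appends directly to the final list, with the hash-stripping while-loop replaced by a single lstrip over hash marks and whitespace; the intermediate list disappears.
import Mathlib
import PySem

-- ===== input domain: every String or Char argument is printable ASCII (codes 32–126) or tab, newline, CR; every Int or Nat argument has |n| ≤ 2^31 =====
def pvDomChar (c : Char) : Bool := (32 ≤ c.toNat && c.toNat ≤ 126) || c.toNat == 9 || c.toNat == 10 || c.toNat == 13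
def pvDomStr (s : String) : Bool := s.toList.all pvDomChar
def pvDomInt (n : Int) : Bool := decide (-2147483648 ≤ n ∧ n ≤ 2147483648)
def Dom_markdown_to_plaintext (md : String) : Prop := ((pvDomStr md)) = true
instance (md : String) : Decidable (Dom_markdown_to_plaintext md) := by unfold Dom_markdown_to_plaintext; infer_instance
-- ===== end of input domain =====

-- B fuses A's two sequential passes (clean lines, then collapse blank runs) into one streaming
-- loop with simultaneous table/blank state, dropping the intermediate list (objective: alternative).

-- ===== PORT A =====
-- while text.startswith("#"): text = text[1:].lstrip()
def pvStripHashes : List Char → List Char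
  | [] => []
  | c :: rest =>
      if c = '#' then pvStripHashes (PySem.Chars.lstrip rest) else c :: rest
termination_by cs => cs.length
decreasing_by
  simp only [PySem.Chars.lstrip, List.length_cons]
  exact Nat.lt_succ_of_le (List.length_dropWhile_le _ _)

-- body of A's first loop (state: out, in_table)
def pvStepA1 (st : List (List Char) × Bool) (line : List Char) : List (List Char) × Bool :=
  let stripped := PySem.Chars.strip line
  if PySem.Chars.startswith stripped ['|'] && PySem.Chars.endswith stripped ['|'] then
    (st.1, true)
  else if st.2 && stripped.isEmpty then
    (st.1, false)
  else if PySem.Chars.startswith stripped ['|', '-', '-', '-'] then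
    st
  else
    let text := PySem.Chars.replace (PySem.Chars.replace (pvStripHashes stripped) ['*', '*'] []) ['`'] []
    (st.1 ++ [text], st.2)

-- body of A's second loop (state: flat, blanks)
def pvStepA2 (st : List (List Char) × Nat) (ln : List Char) : List (List Char) × Nat :=
  if ln.isEmpty then
    (if st.2 + 1 ≤ 1 then st.1 ++ [ln] else st.1, st.2 + 1)
  else
    (st.1 ++ [ln], 0)

def markdown_to_plaintext (md : String) : String :=
  let out := ((PySem.Chars.splitlines md.toList).foldl pvStepA1 ([], false)).1
  let flat := (out.foldl pvStepA2 ([], 0)).1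
  String.ofList (PySem.Chars.strip (PySem.Chars.join ['\n'] flat) ++ ['\n'])

-- ===== PORT B =====
-- Source B's _clean_line; s.lstrip("# \t") is ported as dropWhile over '#' and Python whitespace
-- (exact on the printable-ASCII domain: split lines carry no whitespace besides ' ' and '\t')
def pvCleanLine (in_table : Bool) (line : List Char) : Bool × Option (List Char) :=
  let s := PySem.Chars.strip line
  if PySem.Chars.startswith s ['|'] && PySem.Chars.endswith s ['|'] then
    (true, none)
  else if in_table && s.isEmpty then
    (false, none)
  else if PySem.Chars.startswith s ['|', '-', '-', '-'] then
    (in_table, none)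
  else
    let t := s.dropWhile (fun c => c = '#' || PySem.Chars.isspace c)
    (in_table, some (PySem.Chars.replace (PySem.Chars.replace t ['*', '*'] []) ['`'] []))

-- body of B's single fused loop (state: result, in_table, blanks)
def pvStepB (st : List (List Char) × Bool × Nat) (line : List Char) : List (List Char) × Bool × Nat :=
  match pvCleanLine st.2.1 line with
  | (it, none) => (st.1, it, st.2.2)
  | (it, some t) =>
      if t.isEmpty then
        ((if st.2.2 + 1 ≤ 1 then st.1 ++ [t] else st.1), it, st.2.2 + 1)
      else
        (st.1 ++ [t], it, 0)

def markdown_to_plaintext_alt (md : String) : String :=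
  let st := (PySem.Chars.splitlines md.toList).foldl pvStepB ([], false, 0)
  String.ofList (PySem.Chars.strip (PySem.Chars.join ['\n'] st.1) ++ ['\n'])

-- ===== PRECONDITION & SPEC =====
def Spec_markdown_to_plaintext (md : String) (out : String) : Prop := out = markdown_to_plaintext_alt md
instance (md : String) (out : String) : Decidable (Spec_markdown_to_plaintext md out) := by unfold Spec_markdown_to_plaintext; infer_instance

-- ===== CLAIM (what is proved, stated in full; the proofs are below) =====
def Claim_equal_markdown_to_plaintext : Prop := ∀ (md : String), Dom_markdown_to_plaintext md → Spec_markdown_to_plaintext md (markdown_to_plaintext md)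

-- ===== LEMMAS AND PROOFS =====

theorem pv_dw_head {q : Char → Bool} {a : Char} {l : List Char}
    (h : (a :: l).dropWhile q = a :: l) : q a = false := by
  by_cases hq : q a = true
  · rw [List.dropWhile_cons_of_pos hq] at h
    have := List.length_dropWhile_le q l
    have := congrArg List.length h
    simp at this
    omega
  · simpa using hq

theorem pv_dw_idem (q : Char → Bool) (l : List Char) :
    (l.dropWhile q).dropWhile q = l.dropWhile q := by
  induction l with
  | nil => simp
  | cons a l ih =>
      by_cases hq : q a = true
      · rw [List.dropWhile_cons_of_pos hq]; exact ih
      · rw [List.dropWhile_cons_of_neg (by simpa using hq),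
            List.dropWhile_cons_of_neg (by simpa using hq)]

theorem pv_dw_prefix {q : Char → Bool} {s t : List Char} (hp : s <+: t)
    (h : t.dropWhile q = t) : s.dropWhile q = s := by
  cases s with
  | nil => simp
  | cons a s' =>
      obtain ⟨u, hu⟩ := hp
      subst hu
      have : q a = false := pv_dw_head h
      rw [List.dropWhile_cons_of_neg (by simp [this])]

-- strip output has no leading whitespace
theorem pv_strip_noLead (line : List Char) :
    (PySem.Chars.strip line).dropWhile PySem.Chars.isspace = PySem.Chars.strip line := by
  unfold PySem.Chars.strip PySem.Chars.rstrip PySem.Chars.lstrip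
  apply pv_dw_prefix (t := line.dropWhile PySem.Chars.isspace)
  · have hsuf : (line.dropWhile PySem.Chars.isspace).reverse.dropWhile PySem.Chars.isspace
        <:+ (line.dropWhile PySem.Chars.isspace).reverse := List.dropWhile_suffix _
    have := List.reverse_prefix.mpr hsuf
    simpa using this
  · exact pv_dw_idem _ _

theorem pv_dw_skip (q : Char → Bool) (l : List Char)
    (himp : ∀ c, PySem.Chars.isspace c = true → q c = true) :
    (l.dropWhile PySem.Chars.isspace).dropWhile q = l.dropWhile q := by
  induction l with
  | nil => simp
  | cons a l ih =>
      by_cases hs : PySem.Chars.isspace a = true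
      · rw [List.dropWhile_cons_of_pos hs, List.dropWhile_cons_of_pos (himp a hs)]
        exact ih
      · rw [List.dropWhile_cons_of_neg (by simpa using hs)]

-- the while-loop over '#'/lstrip equals one dropWhile, on inputs with no leading whitespace
theorem pv_stripHashes_eq (cs : List Char)
    (h : cs.dropWhile PySem.Chars.isspace = cs) :
    pvStripHashes cs = cs.dropWhile (fun c => c = '#' || PySem.Chars.isspace c) := by
  fun_induction pvStripHashes cs with
  | case1 => simp
  | case2 rest ih =>
      rw [List.dropWhile_cons_of_pos (by simp)]
      rw [ih (by unfold PySem.Chars.lstrip; exact pv_dw_idem _ _)]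
      unfold PySem.Chars.lstrip
      exact pv_dw_skip _ rest (by simp_all)
  | case3 c rest hc =>
      have hs : PySem.Chars.isspace c = false := pv_dw_head h
      rw [List.dropWhile_cons_of_neg (by simp [hs, hc])]

-- A's first-pass step, expressed through B's line cleaner
theorem pv_stepA1_eq (o : List (List Char)) (it : Bool) (line : List Char) :
    pvStepA1 (o, it) line =
      match pvCleanLine it line with
      | (it', none) => (o, it')
      | (it', some t) => (o ++ [t], it') := by
  unfold pvStepA1 pvCleanLine
  have hh := pv_stripHashes_eq (PySem.Chars.strip line) (pv_strip_noLead line)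
  simp only [hh]
  split_ifs <;> rfl

-- A's first pass appends to its accumulator
theorem pv_foldA1_append (lines : List (List Char)) (o : List (List Char)) (it : Bool) :
    lines.foldl pvStepA1 (o, it)
      = (o ++ (lines.foldl pvStepA1 ([], it)).1, (lines.foldl pvStepA1 ([], it)).2) := by
  induction lines generalizing o it with
  | nil => simp
  | cons l ls ih =>
      simp only [List.foldl_cons]
      rw [pv_stepA1_eq o it l, pv_stepA1_eq [] it l]
      cases hcl : pvCleanLine it l with
      | mk it' ot =>
          cases ot with
          | none => simpa using ih o it'
          | some t =>
              simp only [List.nil_append]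
              rw [ih (o ++ [t]) it', ih [t] it']
              simp

-- fusion: B's single pass equals A's clean pass followed by A's collapse pass
theorem pv_fusion (lines : List (List Char)) (res : List (List Char)) (it : Bool) (b : Nat) :
    lines.foldl pvStepB (res, it, b)
      = ((((lines.foldl pvStepA1 ([], it)).1).foldl pvStepA2 (res, b)).1,
         (lines.foldl pvStepA1 ([], it)).2,
         (((lines.foldl pvStepA1 ([], it)).1).foldl pvStepA2 (res, b)).2) := by
  induction lines generalizing res it b with
  | nil => simp
  | cons l ls ih =>
      simp only [List.foldl_cons]
      rw [pv_stepA1_eq [] it l]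
      cases hcl : pvCleanLine it l with
      | mk it' ot =>
          cases ot with
          | none =>
              simp only [pvStepB, hcl]
              exact ih res it' b
          | some t =>
              simp only [pvStepB, hcl, List.nil_append]
              rw [pv_foldA1_append ls [t] it']
              by_cases ht : t.isEmpty = true
              · simp only [ht, if_true, List.singleton_append, List.foldl_cons]
                rw [ih _ it' (b + 1)]
                simp [pvStepA2, ht]
              · simp only [ht, Bool.false_eq_true, if_false, List.singleton_append, List.foldl_cons]
                rw [ih _ it' 0]
                simp [pvStepA2, ht]

-- ===== VERDICT (by name: the statement is the Claim_ definition above) =====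
theorem markdown_to_plaintext_spec : Claim_equal_markdown_to_plaintext := by
  intro md _
  unfold Spec_markdown_to_plaintext markdown_to_plaintext markdown_to_plaintext_alt
  rw [pv_fusion]
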